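-- pv_equiv track=rewrite | github.com/geraint36/SublimeVBScriptLibraries | VBScriptLibraryUtil/ImportDetails.py | splitMultiLineCode
-- ===== SOURCE A (Python) =====
-- def splitMultiLineCode(line):
-- 	lines = []
-- 	inStr = False
-- 	pos = 0
-- 	lastPos = 0
-- 	for char in line:
-- 		if char == '"':
-- 			inStr = not inStr
-- 		# exit loop when comment starts
-- 		elif (not inStr) and (char == ":"):
-- 			lines.append(line[lastPos:pos].strip())
-- 			lastPos = pos + 1
--
-- 		pos += 1
--
-- 	# incase of empty line
-- 	if len(line) > lastPos:
-- 		lines.append(line[lastPos:].strip())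
-- 	return lines
-- ===== SOURCE B (Python) =====
-- def splitMultiLineCode(line):
-- 	segs = []
-- 	buf = []
-- 	inStr = False
-- 	for ch in line:
-- 		if ch == '"':
-- 			inStr = not inStr
-- 			buf.append(ch)
-- 		elif ch == ':' and not inStr:
-- 			segs.append(''.join(buf).strip())
-- 			buf = []
-- 		else:
-- 			buf.append(ch)
-- 	if buf:
-- 		segs.append(''.join(buf).strip())
-- 	return segs
-- ===== Notes on version B (the rewrite author's own statement) =====
-- stated objective: alternative
-- what changed: B builds each segment in a character buffer flushed at every unquoted colon, instead of tracking integer positions and slicing the line; the index bookkeeping and the trailing len(line)>lastPos check disappear (the buffer is simply flushed when nonempty).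
import Mathlib
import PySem

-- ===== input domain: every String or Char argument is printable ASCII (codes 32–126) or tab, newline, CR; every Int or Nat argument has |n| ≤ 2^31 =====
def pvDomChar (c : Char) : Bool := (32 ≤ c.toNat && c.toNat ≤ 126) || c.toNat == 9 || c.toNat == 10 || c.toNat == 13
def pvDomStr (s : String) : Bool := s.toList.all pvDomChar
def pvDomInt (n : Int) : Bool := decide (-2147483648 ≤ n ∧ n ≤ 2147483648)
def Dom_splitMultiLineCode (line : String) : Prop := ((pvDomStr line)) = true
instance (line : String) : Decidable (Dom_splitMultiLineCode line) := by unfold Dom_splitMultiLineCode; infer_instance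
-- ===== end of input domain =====

-- B replaces A's integer position/slice bookkeeping by a character buffer flushed at
-- each unquoted colon; same O(n) cost, different decomposition. Equivalence proved on all inputs.

-- ===== PORT A =====
-- loop of A: state (lines, inStr, pos, lastPos); returns (lines, lastPos)
def splitA (cs : List Char) : List Char → List String → Bool → Int → Int → List String × Int
  | [], lines, _, _, lastPos => (lines, lastPos)
  | c :: rest, lines, inStr, pos, lastPos =>
    if c = '"' then splitA cs rest lines (!inStr) (pos + 1) lastPos
    else if inStr = false ∧ c = ':' then
      splitA cs rest
        (lines ++ [String.ofList (PySem.Chars.strip (PySem.List.slice cs (some lastPos) (some pos)))])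
        inStr (pos + 1) (pos + 1)
    else splitA cs rest lines inStr (pos + 1) lastPos

-- the 'if len(line) > lastPos' epilogue of A
def splitAFin (cs : List Char) (r : List String × Int) : List String :=
  if (cs.length : Int) > r.2 then
    r.1 ++ [String.ofList (PySem.Chars.strip (PySem.List.slice cs (some r.2) none))]
  else r.1

def splitMultiLineCode (line : String) : List String :=
  splitAFin line.toList (splitA line.toList line.toList [] false 0 0)

-- ===== PORT B =====
-- loop of B: state (segs, buf, inStr); returns (segs, buf)
def splitB : List Char → List String → List Char → Bool → List String × List Char
  | [], segs, buf, _ => (segs, buf)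
  | c :: rest, segs, buf, inStr =>
    if c = '"' then splitB rest segs (buf ++ [c]) (!inStr)
    else if c = ':' ∧ inStr = false then
      splitB rest (segs ++ [String.ofList (PySem.Chars.strip buf)]) [] inStr
    else splitB rest segs (buf ++ [c]) inStr

-- the 'if buf' epilogue of B
def splitBFin (r : List String × List Char) : List String :=
  if r.2 ≠ [] then r.1 ++ [String.ofList (PySem.Chars.strip r.2)] else r.1

def splitMultiLineCode_alt (line : String) : List String :=
  splitBFin (splitB line.toList [] [] false)

-- ===== PRECONDITION & SPEC =====
def Spec_splitMultiLineCode (line : String) (out : List String) : Prop := out = splitMultiLineCode_alt line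
instance (line : String) (out : List String) : Decidable (Spec_splitMultiLineCode line out) := by unfold Spec_splitMultiLineCode; infer_instance

-- ===== CLAIM (what is proved, stated in full; the proofs are below) =====
def Claim_equal_splitMultiLineCode : Prop := ∀ (line : String), Dom_splitMultiLineCode line → Spec_splitMultiLineCode line (splitMultiLineCode line)

-- ===== LEMMAS AND PROOFS =====

-- A's slice line[lp:p] equals B's buffer (the already-seen characters past lp)
lemma slice_pre (pre rest : List Char) (lp : Nat) (h : lp ≤ pre.length) :
    PySem.List.slice (pre ++ rest) (some (lp : Int)) (some (pre.length : Int)) = pre.drop lp := by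
  rw [PySem.List.slice_natCast]
  rw [List.drop_append_of_le_length h]
  rw [List.take_append_of_le_length (by simp)]
  simp

-- loop invariant: A's state (pos = pre.length, lastPos = lp) corresponds to B's buffer pre.drop lp
lemma split_go (cs : List Char) :
    ∀ (rest pre : List Char) (lines : List String) (inStr : Bool) (lp : Nat),
      cs = pre ++ rest → lp ≤ pre.length →
      ∃ lp' : Nat, lp' ≤ cs.length ∧
        splitA cs rest lines inStr (pre.length : Int) (lp : Int)
          = ((splitB rest lines (pre.drop lp) inStr).1, (lp' : Int)) ∧
        (splitB rest lines (pre.drop lp) inStr).2 = cs.drop lp' := by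
  intro rest
  induction rest with
  | nil =>
    intro pre lines inStr lp hcs hlp
    exact ⟨lp, by simp [hcs]; omega, by simp [splitA, splitB], by simp [splitB, hcs]⟩
  | cons c rest ih =>
    intro pre lines inStr lp hcs hlp
    have hcs' : cs = (pre ++ [c]) ++ rest := by simp [hcs]
    have hdrop : (pre ++ [c]).drop lp = pre.drop lp ++ [c] :=
      List.drop_append_of_le_length hlp
    have hlp' : lp ≤ (pre ++ [c]).length := by simp only [List.length_append]; omega
    by_cases hq : c = '"'
    · simp only [splitA, splitB, if_pos hq]
      obtain ⟨lp', h1, h2, h3⟩ := ih (pre ++ [c]) lines (!inStr) lp hcs' hlp'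
      rw [hdrop] at h2 h3
      simp only [List.length_append, List.length_cons, List.length_nil, Nat.cast_add,
        Nat.cast_one] at h2
      exact ⟨lp', h1, h2, h3⟩
    · by_cases hc : c = ':' ∧ inStr = false
      · have hA : (inStr = false ∧ c = ':') := ⟨hc.2, hc.1⟩
        simp only [splitA, splitB, if_neg hq, if_pos hA, if_pos hc]
        have hseg : PySem.List.slice cs (some (lp : Int)) (some (pre.length : Int))
            = pre.drop lp := by rw [hcs]; exact slice_pre pre (c :: rest) lp hlp
        obtain ⟨lp', h1, h2, h3⟩ :=
          ih (pre ++ [c]) (lines ++ [String.ofList (PySem.Chars.strip (pre.drop lp))]) inStr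
            (pre.length + 1) hcs' (by simp)
        have hd : (pre ++ [c]).drop (pre.length + 1) = [] := by simp
        rw [hd] at h2 h3
        simp only [List.length_append, List.length_cons, List.length_nil, Nat.cast_add,
          Nat.cast_one] at h2
        rw [hseg]
        exact ⟨lp', h1, h2, h3⟩
      · have hA : ¬ (inStr = false ∧ c = ':') := fun h => hc ⟨h.2, h.1⟩
        simp only [splitA, splitB, if_neg hq, if_neg hA, if_neg hc]
        obtain ⟨lp', h1, h2, h3⟩ := ih (pre ++ [c]) lines inStr lp hcs' hlp'
        rw [hdrop] at h2 h3
        simp only [List.length_append, List.length_cons, List.length_nil, Nat.cast_add,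
          Nat.cast_one] at h2
        exact ⟨lp', h1, h2, h3⟩

-- ===== VERDICT (by name: the statement is the Claim_ definition above) =====
theorem splitMultiLineCode_spec : Claim_equal_splitMultiLineCode := by
  intro line _
  unfold Spec_splitMultiLineCode splitMultiLineCode splitMultiLineCode_alt
  obtain ⟨lp', h1, h2, h3⟩ :=
    split_go line.toList line.toList [] [] false 0 (by simp) (by simp)
  simp only [List.length_nil, Nat.cast_zero, List.drop_zero] at h2 h3
  rw [h2]
  unfold splitAFin splitBFin
  simp only [h3]
  by_cases hlt : lp' < line.toList.length
  · rw [if_pos (by exact_mod_cast hlt),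
      if_pos (by simp only [ne_eq, List.drop_eq_nil_iff, not_le]; omega),
      PySem.List.slice_from_natCast]
  · rw [if_neg (by omega), if_neg (by simp only [ne_eq, List.drop_eq_nil_iff, not_not]; omega)]
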